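-- pv_equiv track=rewrite | github.com/ayub69/TRANSIT-FUNCTIONALITY-code | test.py | count_transfers_from_state_path
-- ===== SOURCE A (Python) =====
-- from typing import Dict, List, Tuple, Optional, Any
--
-- def count_transfers_from_state_path(state_path: List[Tuple[int, int]]) -> int:
--     if not state_path:
--         return 0
--     transfers = 0
--     prev_route = int(state_path[0][1])
--     for _, r in state_path[1:]:
--         r = int(r)
--         if r != prev_route:
--             transfers += 1
--             prev_route = r
--     return transfers
-- ===== SOURCE B (Python) =====
-- def count_transfers_from_state_path(state_path):
--     routes = [int(r) for _, r in state_path]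
--
--     def go(lo, hi):
--         # transfers within routes[lo:hi], by divide and conquer:
--         # split at mid, count each half, plus the boundary pair.
--         if hi - lo < 2:
--             return 0
--         mid = (lo + hi) // 2
--         return go(lo, mid) + go(mid, hi) + (routes[mid - 1] != routes[mid])
--
--     return go(0, len(routes))
-- ===== Notes on version B (the rewrite author's own statement) =====
-- stated objective: alternative
-- what changed: Replaces A's single left-to-right pass with prev_route state by a divide-and-conquer recursion: split the route array at the midpoint, count transfers in each half independently, and add the boundary comparison routes[mid-1] != routes[mid]; correct because adjacent-change counting is additive over a split with the one boundary pair.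
import Mathlib
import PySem

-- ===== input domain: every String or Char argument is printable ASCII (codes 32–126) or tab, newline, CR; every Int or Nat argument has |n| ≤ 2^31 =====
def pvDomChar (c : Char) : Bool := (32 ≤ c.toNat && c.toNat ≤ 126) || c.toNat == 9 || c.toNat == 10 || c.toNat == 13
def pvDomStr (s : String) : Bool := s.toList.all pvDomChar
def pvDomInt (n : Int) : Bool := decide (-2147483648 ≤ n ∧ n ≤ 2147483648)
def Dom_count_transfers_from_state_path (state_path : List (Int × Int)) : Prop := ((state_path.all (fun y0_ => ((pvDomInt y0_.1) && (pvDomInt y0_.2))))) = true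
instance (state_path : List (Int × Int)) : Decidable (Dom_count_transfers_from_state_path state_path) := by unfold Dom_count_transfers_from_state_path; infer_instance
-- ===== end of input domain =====

-- B replaces A's single-pass prev_route loop with a divide-and-conquer recursion over
-- the route array (count each half, add the midpoint boundary comparison); objective: alternative.


-- ===== PORT A =====
-- A: explicit loop keeping (transfers, prev_route) state over the tail; int() is identity on Int.
def pvAStep (st : Int × Int) (pr : Int × Int) : Int × Int :=
  let r := pr.2
  if r ≠ st.2 then (st.1 + 1, r) else st

def count_transfers_from_state_path (state_path : List (Int × Int)) : Int :=
  match state_path with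
  | [] => 0
  | h :: tl => (tl.foldl pvAStep (0, h.2)).1

-- ===== PORT B =====
-- B: divide and conquer on index range [lo,hi) of the route array: halves plus boundary pair.
-- (routes[mid-1] / routes[mid] are in range whenever read, so getD is exact there.)
def pvGo (routes : List Int) (lo hi : Nat) : Int :=
  if hi - lo < 2 then 0
  else
    let mid := (lo + hi) / 2
    pvGo routes lo mid + pvGo routes mid hi +
      (if routes.getD (mid - 1) 0 ≠ routes.getD mid 0 then 1 else 0)
termination_by hi - lo
decreasing_by all_goals omega

def count_transfers_from_state_path_alt (state_path : List (Int × Int)) : Int :=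
  let routes := state_path.map (fun s => s.2)
  pvGo routes 0 routes.length

-- ===== PRECONDITION & SPEC =====
def Spec_count_transfers_from_state_path (state_path : List (Int × Int)) (out : Int) : Prop := out = count_transfers_from_state_path_alt state_path
instance (state_path : List (Int × Int)) (out : Int) : Decidable (Spec_count_transfers_from_state_path state_path out) := by unfold Spec_count_transfers_from_state_path; infer_instance

-- ===== CLAIM (what is proved, stated in full; the proofs are below) =====
def Claim_equal_count_transfers_from_state_path : Prop := ∀ (state_path : List (Int × Int)), Dom_count_transfers_from_state_path state_path → Spec_count_transfers_from_state_path state_path (count_transfers_from_state_path state_path)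

-- ===== LEMMAS AND PROOFS =====

-- canonical adjacent-change count, the common characterisation of both ports
def pvAdj : List Int → Int
  | a :: b :: tl => (if a ≠ b then 1 else 0) + pvAdj (b :: tl)
  | _ => 0

lemma pvAdj_cons_cons (a b : Int) (l : List Int) :
    pvAdj (a :: b :: l) = (if a ≠ b then 1 else 0) + pvAdj (b :: l) := rfl

lemma pv_fold_eq_adj (tl : List (Int × Int)) : ∀ (t p : Int),
    (tl.foldl pvAStep (t, p)).1 = t + pvAdj (p :: tl.map Prod.snd) := by
  induction tl with
  | nil => intro t p; simp [pvAdj]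
  | cons x rest ih =>
    intro t p
    simp only [List.foldl_cons, List.map_cons, pvAStep]
    by_cases h : x.2 = p
    · subst h; simp [ih, pvAdj]
    · rw [if_pos h, ih]
      rw [pvAdj_cons_cons, if_pos (fun hh => h hh.symm)]
      ring

lemma pvAdj_append_cons : ∀ (xs : List Int) (a : Int) (ys : List Int),
    pvAdj (xs ++ a :: ys) = pvAdj (xs ++ [a]) + pvAdj (a :: ys) := by
  intro xs
  induction xs with
  | nil => intro a ys; simp [pvAdj]
  | cons x xs ih =>
    intro a ys
    cases xs with
    | nil => simp [pvAdj]
    | cons y xs' =>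
      have h := ih a ys
      simp only [List.cons_append] at h ⊢
      rw [pvAdj_cons_cons, pvAdj_cons_cons, h]
      ring

lemma pv_range_split (lo mid hi : Nat) (h1 : lo ≤ mid) (h2 : mid ≤ hi) :
    List.range' lo (mid - lo) ++ List.range' mid (hi - mid) = List.range' lo (hi - lo) := by
  have e := List.range'_append (s := lo) (m := mid - lo) (n := hi - mid) (step := 1)
  rw [show lo + 1 * (mid - lo) = mid by omega] at e
  rw [show (mid - lo) + (hi - mid) = hi - lo by omega] at e
  exact e

lemma pv_range_concat (lo mid : Nat) (h : lo + 1 ≤ mid) :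
    List.range' lo (mid - lo) = List.range' lo (mid - 1 - lo) ++ [mid - 1] := by
  have e := List.range'_concat (s := lo) (n := mid - 1 - lo) (step := 1)
  rw [show mid - lo = (mid - 1 - lo) + 1 by omega, e, show lo + 1 * (mid - 1 - lo) = mid - 1 by omega]

lemma pv_range_cons (mid hi : Nat) (h : mid + 1 ≤ hi) :
    List.range' mid (hi - mid) = mid :: List.range' (mid + 1) (hi - mid - 1) := by
  have e := List.range'_succ (s := mid) (n := hi - mid - 1) (step := 1)
  rw [show hi - mid - 1 + 1 = hi - mid by omega] at e
  simpa using e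

lemma pv_go_eq_adj (routes : List Int) : ∀ (n lo hi : Nat), hi - lo = n →
    pvGo routes lo hi = pvAdj ((List.range' lo (hi - lo)).map (fun i => routes.getD i 0)) := by
  intro n
  induction n using Nat.strong_induction_on with
  | _ n ih =>
    intro lo hi hn
    rw [pvGo]
    by_cases hsmall : hi - lo < 2
    · rw [if_pos hsmall]
      rcases (by omega : hi - lo = 0 ∨ hi - lo = 1) with h | h <;> rw [h] <;> simp [pvAdj]
    · rw [if_neg hsmall]
      have hge : lo + 2 ≤ hi := by omega
      set mid := (lo + hi) / 2 with hmid
      have hm1 : lo + 1 ≤ mid := by omega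
      have hm2 : mid + 1 ≤ hi := by omega
      have ihl := ih (mid - lo) (by omega) lo mid rfl
      have ihr := ih (hi - mid) (by omega) mid hi rfl
      rw [← pv_range_split lo mid hi (by omega) (by omega),
          pv_range_concat lo mid hm1, pv_range_cons mid hi hm2]
      simp only [List.map_append, List.map_cons, List.append_assoc, List.cons_append,
                 List.nil_append]
      rw [pvAdj_append_cons, pvAdj_cons_cons]
      rw [ihl, ihr, pv_range_concat lo mid hm1, pv_range_cons mid hi hm2]
      simp only [List.map_append, List.map_cons, List.map_nil]
      ring

lemma pv_map_range_getD (xs : List Int) :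
    (List.range' 0 xs.length).map (fun i => xs.getD i 0) = xs := by
  apply List.ext_getElem
  · simp
  · intro i h1 h2
    simp [List.getD_eq_getElem?_getD, h2]

-- ===== VERDICT (by name: the statement is the Claim_ definition above) =====
theorem count_transfers_from_state_path_spec : Claim_equal_count_transfers_from_state_path := by
  intro state_path _
  unfold Spec_count_transfers_from_state_path
  unfold count_transfers_from_state_path_alt
  rw [pv_go_eq_adj (state_path.map (fun s => s.2)) (state_path.map (fun s => s.2)).length 0
        (state_path.map (fun s => s.2)).length (by simp), Nat.sub_zero, pv_map_range_getD]
  cases state_path with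
  | nil => simp [count_transfers_from_state_path, pvAdj]
  | cons h tl =>
    simp [count_transfers_from_state_path, pv_fold_eq_adj]
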